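-- pv_equiv track=rewrite | github.com/BastianLederer/AdventOfCode2024 | day20_shortcuts.py | num_cheats
-- ===== SOURCE A (Python) =====
-- from typing import Set, Tuple, Generator
--
-- Point = Tuple[int, int]
--
-- def manhattan(dist: int) -> Generator[Point, None, None]:
--     for y in range(-dist, dist + 1):
--         for x in range(-(dist - abs(y)), dist - abs(y) + 1):
--             yield x, y
--
-- def num_cheats(track: dict, dist: int, saving_required: int) -> int:
--     tot = 0
--     for (x, y), score in track.items():
--         for dx, dy in manhattan(dist):
--             if dy == dx == 0:
--                 continue
--             x2, y2 = x + dx, y + dy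
--
--             if (x2, y2) in track:
--                 saved = track[x2, y2] - score - abs(dx) - abs(dy)
--                 if saved >= saving_required:
--                     tot += 1
--
--     return tot
-- ===== SOURCE B (Python) =====
-- def num_cheats(track: dict, dist: int, saving_required: int) -> int:
--     # all-pairs scan over the track items instead of A's Manhattan-offset
--     # neighbourhood probe around each cell
--     items = list(track.items())
--     tot = 0
--     for (x1, y1), s1 in items:
--         for (x2, y2), s2 in items:
--             md = abs(x1 - x2) + abs(y1 - y2)
--             if 0 < md <= dist and s2 - s1 - md >= saving_required:
--                 tot += 1
--     return tot
-- ===== Notes on version B (the rewrite author's own statement) =====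
-- stated objective: faster
-- what changed: B drops the manhattan-offset generator and the per-offset dict lookup entirely and instead counts over all ordered pairs of track items, testing 0 < manhattan-distance <= dist and the saving directly, so the cost no longer grows with dist^2.
import Mathlib
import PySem

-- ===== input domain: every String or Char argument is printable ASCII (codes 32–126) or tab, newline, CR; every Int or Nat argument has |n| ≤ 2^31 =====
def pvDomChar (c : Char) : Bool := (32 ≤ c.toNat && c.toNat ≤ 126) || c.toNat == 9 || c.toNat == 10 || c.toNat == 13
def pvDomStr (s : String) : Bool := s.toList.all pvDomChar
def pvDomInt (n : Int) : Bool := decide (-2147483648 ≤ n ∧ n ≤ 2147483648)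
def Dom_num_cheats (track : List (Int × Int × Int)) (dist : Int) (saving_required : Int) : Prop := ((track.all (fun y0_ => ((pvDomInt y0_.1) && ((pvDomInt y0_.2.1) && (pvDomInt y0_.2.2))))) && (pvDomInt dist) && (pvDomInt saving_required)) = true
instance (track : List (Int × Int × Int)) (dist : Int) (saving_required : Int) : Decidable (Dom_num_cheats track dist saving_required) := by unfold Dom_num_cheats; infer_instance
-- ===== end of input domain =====

-- B replaces A's Manhattan-offset neighbourhood probe (dict lookup per offset, cost growing
-- with dist^2) by an all-pairs scan over the track items; measured faster at large dist.


-- ===== PORT A =====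
-- manhattan(dist): the generator, as the list of yielded (x, y) pairs
def manhattanList (dist : Int) : List (Int × Int) :=
  (PySem.List.pyRange (-dist) (dist + 1) 1).flatMap (fun y =>
    (PySem.List.pyRange (-(dist - |y|)) (dist - |y| + 1) 1).map (fun x => (x, y)))

-- '(x2, y2) in track' / 'track[x2, y2]': first-match lookup in the association list
-- (exact for a Python dict, whose keys are distinct)
def trackGet? (track : List (Int × Int × Int)) (a b : Int) : Option Int :=
  match track with
  | [] => none
  | t :: rest => if t.1 = a ∧ t.2.1 = b then some t.2.2 else trackGet? rest a b

def num_cheats (track : List (Int × Int × Int)) (dist : Int) (saving_required : Int) : Int :=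
  track.foldl (fun tot item =>
    (manhattanList dist).foldl (fun (tot2 : Int) (d : Int × Int) =>
      if d.2 = d.1 ∧ d.1 = 0 then tot2
      else
        match trackGet? track (item.1 + d.1) (item.2.1 + d.2) with
        | some t =>
          if t - item.2.2 - |d.1| - |d.2| ≥ saving_required then tot2 + 1 else tot2
        | none => tot2) tot) 0

-- ===== PORT B =====
def num_cheats_alt (track : List (Int × Int × Int)) (dist : Int) (saving_required : Int) : Int :=
  track.foldl (fun tot p1 =>
    track.foldl (fun tot2 p2 =>
      let md := |p1.1 - p2.1| + |p1.2.1 - p2.2.1|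
      if 0 < md ∧ md ≤ dist ∧ p2.2.2 - p1.2.2 - md ≥ saving_required then tot2 + 1
      else tot2) tot) 0

-- ===== PRECONDITION & SPEC =====
-- track is a Python dict keyed by (x, y): its keys are necessarily distinct, so Pre_
-- only rules out association lists with duplicate (x, y) keys, which no dict produces.
def Pre_num_cheats (track : List (Int × Int × Int)) (dist : Int) (saving_required : Int) : Prop :=
  (track.map (fun t => (t.1, t.2.1))).Nodup
instance (track : List (Int × Int × Int)) (dist : Int) (saving_required : Int) : Decidable (Pre_num_cheats track dist saving_required) := by unfold Pre_num_cheats; infer_instance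

def pvWitness_num_cheats : (List (Int × Int × Int)) × Int × Int :=
  ([(0, 0, 0), (1, 0, 2), (0, 1, 5)], 2, 1)

def Spec_num_cheats (track : List (Int × Int × Int)) (dist : Int) (saving_required : Int) (out : Int) : Prop := out = num_cheats_alt track dist saving_required
instance (track : List (Int × Int × Int)) (dist : Int) (saving_required : Int) (out : Int) : Decidable (Spec_num_cheats track dist saving_required out) := by unfold Spec_num_cheats; infer_instance

-- ===== CLAIM (what is proved, stated in full; the proofs are below) =====
def Claim_equal_num_cheats : Prop := ∀ (track : List (Int × Int × Int)) (dist : Int) (saving_required : Int), Dom_num_cheats track dist saving_required → Pre_num_cheats track dist saving_required → Spec_num_cheats track dist saving_required (num_cheats track dist saving_required)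

-- ===== LEMMAS AND PROOFS =====

-- the Boolean test A's inner loop increments on, for a fixed item (x, y, s)
def hitA (track : List (Int × Int × Int)) (sr x y s : Int) (d : Int × Int) : Bool :=
  !(decide (d.2 = d.1 ∧ d.1 = 0)) &&
  (match trackGet? track (x + d.1) (y + d.2) with
   | some t => decide (t - s - |d.1| - |d.2| ≥ sr)
   | none => false)

-- the Boolean test B's inner loop increments on, for a fixed item (x, y, s)
def hitB (dist sr x y s : Int) (p2 : Int × Int × Int) : Bool :=
  decide (0 < |x - p2.1| + |y - p2.2.1| ∧ |x - p2.1| + |y - p2.2.1| ≤ dist ∧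
          p2.2.2 - s - (|x - p2.1| + |y - p2.2.1|) ≥ sr)

theorem mem_manhattanList (dist : Int) (d : Int × Int) :
    d ∈ manhattanList dist ↔ |d.1| + |d.2| ≤ dist := by
  obtain ⟨dx, dy⟩ := d
  simp only [manhattanList, List.mem_flatMap, List.mem_map, PySem.List.mem_pyRange_one,
    Prod.mk.injEq]
  constructor
  · rintro ⟨y, ⟨h1, h2⟩, x, ⟨h3, h4⟩, rfl, rfl⟩
    rcases abs_cases x with ⟨e, _⟩ | ⟨e, _⟩ <;> rcases abs_cases y with ⟨f, _⟩ | ⟨f, _⟩ <;> omega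
  · intro h
    rcases abs_cases dx with ⟨e, _⟩ | ⟨e, _⟩ <;> rcases abs_cases dy with ⟨f, _⟩ | ⟨f, _⟩ <;>
      exact ⟨dy, ⟨by omega, by omega⟩, dx, ⟨by omega, by omega⟩, rfl, rfl⟩

theorem nodup_manhattanList (dist : Int) : (manhattanList dist).Nodup := by
  rw [manhattanList, List.nodup_flatMap]
  constructor
  · intro y _
    exact (PySem.List.nodup_pyRange_one _ _).map (fun a b h => by
      simpa using congrArg Prod.fst h)
  · refine (PySem.List.pairwise_lt_pyRange_one (-dist) (dist + 1)).imp ?_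
    intro a b hab p hpa hpb
    simp only [List.mem_map] at hpa hpb
    obtain ⟨xa, -, rfl⟩ := hpa
    obtain ⟨xb, -, h⟩ := hpb
    have : b = a := by simpa using congrArg Prod.snd h
    omega

theorem trackGet?_eq_some_iff (track : List (Int × Int × Int))
    (h : (track.map (fun t => (t.1, t.2.1))).Nodup) (a b s : Int) :
    trackGet? track a b = some s ↔ (a, b, s) ∈ track := by
  induction track with
  | nil => simp [trackGet?]
  | cons t rest ih =>
    simp only [List.map_cons, List.nodup_cons, List.mem_map] at h
    obtain ⟨hk, hrest⟩ := h
    by_cases hc : t.1 = a ∧ t.2.1 = b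
    · simp only [trackGet?, if_pos hc, Option.some.injEq, List.mem_cons]
      constructor
      · rintro rfl
        left
        obtain ⟨rfl, rfl⟩ := hc
        rfl
      · rintro (rfl | hmem)
        · rfl
        · exact absurd ⟨(a, b, s), hmem, by obtain ⟨rfl, rfl⟩ := hc; rfl⟩ hk
    · simp only [trackGet?, if_neg hc, ih hrest, List.mem_cons]
      constructor
      · exact Or.inr
      · rintro (rfl | hmem)
        · exact absurd ⟨rfl, rfl⟩ hc
        · exact hmem

-- the heart of the equivalence: for any reference cell, A's count over the Manhattan
-- neighbourhood equals B's count over all items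
theorem count_eq (track : List (Int × Int × Int)) (dist sr x y s : Int)
    (h : (track.map (fun t => (t.1, t.2.1))).Nodup) :
    (manhattanList dist).countP (hitA track sr x y s) = track.countP (hitB dist sr x y s) := by
  rw [List.countP_eq_length_filter, List.countP_eq_length_filter]
  have hperm : ((track.filter (hitB dist sr x y s)).map (fun p => (p.1 - x, p.2.1 - y))).Perm
      ((manhattanList dist).filter (hitA track sr x y s)) := by
    have hn1 : ((track.filter (hitB dist sr x y s)).map (fun p => (p.1 - x, p.2.1 - y))).Nodup := by
      have hsub : ((track.filter (hitB dist sr x y s)).map (fun t => (t.1, t.2.1))).Nodup :=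
        (List.filter_sublist.map _).nodup h
      have : (fun (p : Int × Int × Int) => (p.1 - x, p.2.1 - y)) =
          (fun (k : Int × Int) => (k.1 - x, k.2 - y)) ∘ (fun t => (t.1, t.2.1)) := rfl
      rw [this, ← List.map_map]
      refine hsub.map ?_
      intro a b hab
      obtain ⟨a1, a2⟩ := a; obtain ⟨b1, b2⟩ := b
      simp only [Prod.mk.injEq] at hab ⊢
      omega
    have hn2 : ((manhattanList dist).filter (hitA track sr x y s)).Nodup :=
      (nodup_manhattanList dist).filter _
    refine (List.perm_ext_iff_of_nodup hn1 hn2).mpr ?_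
    intro d
    simp only [List.mem_map, List.mem_filter, mem_manhattanList]
    constructor
    · rintro ⟨p, ⟨hp, hq⟩, rfl⟩
      obtain ⟨x2, y2, s2⟩ := p
      simp only [hitB, decide_eq_true_eq] at hq
      obtain ⟨hpos, hle, hcond⟩ := hq
      have e1 : |x2 - x| = |x - x2| := abs_sub_comm _ _
      have e2 : |y2 - y| = |y - y2| := abs_sub_comm _ _
      refine ⟨by simp only [e1, e2]; exact hle, ?_⟩
      simp only [hitA, Bool.and_eq_true, Bool.not_eq_true', decide_eq_false_iff_not]
      have hx : x + (x2 - x) = x2 := by ring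
      have hy : y + (y2 - y) = y2 := by ring
      refine ⟨?_, ?_⟩
      · rintro ⟨h1, h2⟩
        have hx2 : x2 = x := by omega
        have hy2 : y2 = y := by omega
        subst hx2; subst hy2
        simp at hpos
      · simp only [hx, hy]
        rw [(trackGet?_eq_some_iff track h x2 y2 s2).mpr hp]
        simp only [e1, e2, decide_eq_true_eq]
        omega
    · rintro ⟨hmem, hhit⟩
      simp only [hitA, Bool.and_eq_true, Bool.not_eq_true', decide_eq_false_iff_not] at hhit
      obtain ⟨hnz, hrest⟩ := hhit
      cases hget : trackGet? track (x + d.1) (y + d.2) with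
      | none => rw [hget] at hrest; simp at hrest
      | some t =>
        rw [hget] at hrest
        simp only [decide_eq_true_eq] at hrest
        have hp : (x + d.1, y + d.2, t) ∈ track :=
          (trackGet?_eq_some_iff track h _ _ _).mp hget
        refine ⟨(x + d.1, y + d.2, t), ⟨hp, ?_⟩, by obtain ⟨d1, d2⟩ := d; simp only [Prod.mk.injEq]; constructor <;> omega⟩
        simp only [hitB, decide_eq_true_eq]
        have e1 : |x - (x + d.1)| = |d.1| := by rw [abs_sub_comm]; ring_nf
        have e2 : |y - (y + d.2)| = |d.2| := by rw [abs_sub_comm]; ring_nf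
        rw [e1, e2]
        refine ⟨?_, hmem, by omega⟩
        rcases abs_cases d.1 with ⟨f1, g1⟩ | ⟨f1, g1⟩ <;>
          rcases abs_cases d.2 with ⟨f2, g2⟩ | ⟨f2, g2⟩ <;> rw [f1, f2] <;> omega
  rw [← hperm.length_eq, List.length_map]

theorem num_cheats_eq (track : List (Int × Int × Int)) (dist sr : Int) :
    num_cheats track dist sr =
      track.foldl (fun tot p =>
        tot + ((manhattanList dist).countP (hitA track sr p.1 p.2.1 p.2.2) : Int)) 0 := by
  unfold num_cheats
  apply PySem.List.foldl_congr_mem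
  intro tot p _
  refine Eq.trans ?_ (by apply PySem.List.foldl_if_add_one (p := hitA track sr p.1 p.2.1 p.2.2))
  apply PySem.List.foldl_congr_mem
  intro tot2 d _
  simp only [hitA]
  by_cases hz : d.2 = d.1 ∧ d.1 = 0
  · simp [hz]
  · simp only [hz, decide_false, Bool.not_false, Bool.true_and, if_false]
    cases trackGet? track (p.1 + d.1) (p.2.1 + d.2) with
    | none => simp
    | some t => by_cases hc : t - p.2.2 - |d.1| - |d.2| ≥ sr <;> simp [hc]

theorem num_cheats_alt_eq (track : List (Int × Int × Int)) (dist sr : Int) :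
    num_cheats_alt track dist sr =
      track.foldl (fun tot p =>
        tot + (track.countP (hitB dist sr p.1 p.2.1 p.2.2) : Int)) 0 := by
  unfold num_cheats_alt
  apply PySem.List.foldl_congr_mem
  intro tot p _
  refine Eq.trans ?_ (by apply PySem.List.foldl_if_add_one (p := hitB dist sr p.1 p.2.1 p.2.2))
  apply PySem.List.foldl_congr_mem
  intro tot2 p2 _
  simp only [hitB, decide_eq_true_eq]

-- ===== VERDICT (by name: the statement is the Claim_ definition above) =====
theorem num_cheats_spec : Claim_equal_num_cheats := by
  intro track dist sr _ hpre
  unfold Spec_num_cheats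
  rw [num_cheats_eq, num_cheats_alt_eq]
  apply PySem.List.foldl_congr_mem
  intro tot p _
  rw [count_eq track dist sr p.1 p.2.1 p.2.2 hpre]
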